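-- pv_equiv track=rewrite | github.com/tianjon/prism-skills | skills/prism-doc-to-obsidian/lib/obsidian_import.py | iter_trim_trailing_whitespace
-- ===== SOURCE A (Python) =====
-- from typing import Iterable, Mapping, Sequence
--
-- def iter_trim_trailing_whitespace(parts: Iterable[str]) -> Iterable[str]:
--     """Like `"".join(parts).rstrip()` but streaming and bounded-memory."""
--     pending = ""
--     for part in parts:
--         if not part:
--             continue
--         combined = pending + part
--         last_non_ws = -1
--         for idx in range(len(combined) - 1, -1, -1):
--             if not combined[idx].isspace():
--                 last_non_ws = idx
--                 break
--         if last_non_ws == -1: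
--             pending = combined
--             continue
--         yield combined[: last_non_ws + 1]
--         pending = combined[last_non_ws + 1 :]
-- ===== SOURCE B (Python) =====
-- def iter_trim_trailing_whitespace(parts):
--     """Like `"".join(parts).rstrip()` but in two staged passes: join everything
--     once, record a cut offset at each part's last non-whitespace character,
--     then yield the slices between consecutive cuts.  (Not streaming: trades
--     A's bounded memory for a flat two-phase structure.)"""
--     parts = list(parts)
--     s = "".join(parts)
--     cuts = []
--     pos = 0
--     for part in parts:
--         k = len(part.rstrip())
--         if k:
--             cuts.append(pos + k)
--         pos += len(part)
--     prev = 0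
--     for c in cuts:
--         yield s[prev:c]
--         prev = c
-- ===== Notes on version B (the rewrite author's own statement) =====
-- stated objective: alternative
-- what changed: A streams with a pending-whitespace accumulator and a backward index scan over pending+part at every step; B instead works in two staged passes without any pending string: it joins all parts once, computes a cut offset at each part's last non-whitespace character with running-length arithmetic, and slices the joined string between consecutive cuts.
import Mathlib
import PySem

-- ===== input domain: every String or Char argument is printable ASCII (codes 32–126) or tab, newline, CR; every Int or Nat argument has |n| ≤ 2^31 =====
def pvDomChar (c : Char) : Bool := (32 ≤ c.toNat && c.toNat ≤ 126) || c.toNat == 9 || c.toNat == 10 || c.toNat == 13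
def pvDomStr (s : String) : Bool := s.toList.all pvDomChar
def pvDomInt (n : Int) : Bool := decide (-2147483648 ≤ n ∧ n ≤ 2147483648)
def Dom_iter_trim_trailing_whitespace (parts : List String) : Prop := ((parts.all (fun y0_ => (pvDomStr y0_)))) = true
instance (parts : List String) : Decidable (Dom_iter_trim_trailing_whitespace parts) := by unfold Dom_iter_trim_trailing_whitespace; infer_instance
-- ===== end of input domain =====

-- B replaces A's streaming pending-whitespace accumulator with two staged passes:
-- join all parts once, compute cut offsets by running-length arithmetic, slice between
-- cuts (objective: alternative; B is not streaming — same return value, no yields).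
-- A is a generator; the equivalence is about the produced sequence of values.

-- ===== PORT A =====
-- Python's `for idx in range(len(combined)-1, -1, -1): if not combined[idx].isspace(): last_non_ws = idx; break`
-- (the break makes it a backward search; -1 when no non-whitespace is found)
def pvScanBack (cs : List Char) : Nat → Int
  | 0 => -1
  | Nat.succ k => if ¬ (PySem.Chars.isspace (cs.getD k ' ') = true) then (k : Int) else pvScanBack cs k

def pvStepA (st : List String × String) (part : String) : List String × String :=
  if part = "" then st
  else
    let combined := st.2 ++ part
    let last_non_ws := pvScanBack combined.toList combined.toList.length
    if last_non_ws = -1 then (st.1, combined)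
    else (st.1 ++ [PySem.Str.slice combined none (some (last_non_ws + 1))],
          PySem.Str.slice combined (some (last_non_ws + 1)) none)

def iter_trim_trailing_whitespace (parts : List String) : List String :=
  (parts.foldl pvStepA ([], "")).1

-- ===== PORT B =====
-- phase 1: `k = len(part.rstrip()); if k: cuts.append(pos + k); pos += len(part)`
def pvStepCut (st : List Int × Int) (part : String) : List Int × Int :=
  let k := PySem.Str.len (PySem.Str.rstrip part)
  (if k ≠ 0 then st.1 ++ [st.2 + k] else st.1, st.2 + PySem.Str.len part)

-- phase 2: `yield s[prev:c]; prev = c`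
def pvStepEmit (s : String) (st : List String × Int) (c : Int) : List String × Int :=
  (st.1 ++ [PySem.Str.slice s (some st.2) (some c)], c)

def iter_trim_trailing_whitespace_alt (parts : List String) : List String :=
  let s := PySem.Str.join "" parts
  let cuts := (parts.foldl pvStepCut ([], 0)).1
  (cuts.foldl (pvStepEmit s) ([], 0)).1

-- ===== PRECONDITION & SPEC =====
def Spec_iter_trim_trailing_whitespace (parts : List String) (out : List String) : Prop := out = iter_trim_trailing_whitespace_alt parts
instance (parts : List String) (out : List String) : Decidable (Spec_iter_trim_trailing_whitespace parts out) := by unfold Spec_iter_trim_trailing_whitespace; infer_instance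

-- ===== CLAIM (what is proved, stated in full; the proofs are below) =====
def Claim_equal_iter_trim_trailing_whitespace : Prop := ∀ (parts : List String), Dom_iter_trim_trailing_whitespace parts → Spec_iter_trim_trailing_whitespace parts (iter_trim_trailing_whitespace parts)

-- ===== LEMMAS AND PROOFS =====

-- Common reference point: the streaming recursion both ports are reduced to.
def specGo (p : String) : List String → List String
  | [] => []
  | part :: rest =>
    let kept := PySem.Str.rstrip part
    if kept ≠ "" then
      (p ++ kept) :: specGo (PySem.Str.slice part (some ((kept.length : Nat) : Int)) none) rest
    else specGo (p ++ part) rest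

-- step function matching specGo (used to characterise A's fold)
def pvStepS (st : List String × String) (part : String) : List String × String :=
  let kept := PySem.Str.rstrip part
  if kept ≠ "" then (st.1 ++ [st.2 ++ kept], PySem.Str.slice part (some ((kept.length : Nat) : Int)) none)
  else (st.1, st.2 ++ part)

-- pvScanBack only looks at the first n entries
theorem pvScanBack_congr (cs ds : List Char) (n : Nat) (h : n ≤ cs.length) :
    pvScanBack (cs ++ ds) n = pvScanBack cs n := by
  induction n with
  | zero => rfl
  | succ k ih =>
    have hk : k < cs.length := h
    simp [pvScanBack, List.getElem?_append_left hk, ih (Nat.le_of_lt hk)]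

-- pvScanBack computes (rstrip cs).length - 1 (so -1 iff cs is all whitespace)
theorem pvScanBack_eq_rstrip (cs : List Char) :
    pvScanBack cs cs.length = ((PySem.Chars.rstrip cs).length : Int) - 1 := by
  induction cs using List.reverseRecOn with
  | nil => rfl
  | append_singleton cs c ih =>
    by_cases hc : PySem.Chars.isspace c = true
    · have h1 : pvScanBack (cs ++ [c]) (cs ++ [c]).length = pvScanBack cs cs.length := by
        simp [pvScanBack, hc, pvScanBack_congr cs [c] cs.length le_rfl]
      have h2 : PySem.Chars.rstrip (cs ++ [c]) = PySem.Chars.rstrip cs := by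
        simp [PySem.Chars.rstrip, hc]
      rw [h1, h2, ih]
    · have h2 : PySem.Chars.rstrip (cs ++ [c]) = cs ++ [c] := by
        simp [PySem.Chars.rstrip, hc]
      simp [pvScanBack, hc, h2]

-- rstrip is a prefix, and what it drops is all whitespace
theorem rstrip_prefix_decomp (cs : List Char) :
    cs = PySem.Chars.rstrip cs ++ (cs.reverse.takeWhile PySem.Chars.isspace).reverse ∧
      ((cs.reverse.takeWhile PySem.Chars.isspace).reverse).all PySem.Chars.isspace = true := by
  constructor
  · simp only [PySem.Chars.rstrip]
    calc cs = (cs.reverse).reverse := (List.reverse_reverse cs).symm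
      _ = (cs.reverse.takeWhile PySem.Chars.isspace ++ cs.reverse.dropWhile PySem.Chars.isspace).reverse := by
            rw [List.takeWhile_append_dropWhile]
      _ = _ := by rw [List.reverse_append]
  · simp only [List.all_eq_true, List.mem_reverse]
    exact fun c hc => List.mem_takeWhile_imp hc

-- rstrip across an all-whitespace prefix
theorem rstrip_ws_append (p q : List Char) (hp : p.all PySem.Chars.isspace = true) :
    PySem.Chars.rstrip (p ++ q) =
      if PySem.Chars.rstrip q = [] then [] else p ++ PySem.Chars.rstrip q := by
  have hdp : p.reverse.dropWhile PySem.Chars.isspace = [] := by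
    apply List.dropWhile_eq_nil_iff.mpr
    intro x hx
    exact (List.all_eq_true.mp hp) x (List.mem_reverse.mp hx)
  simp only [PySem.Chars.rstrip, List.reverse_append, List.dropWhile_append, hdp]
  by_cases hq : q.reverse.dropWhile PySem.Chars.isspace = []
  · simp [hq]
  · simp [hq, List.isEmpty_iff]

theorem all_ws_of_rstrip_nil (cs : List Char) (h : PySem.Chars.rstrip cs = []) :
    cs.all PySem.Chars.isspace = true := by
  have hd : cs.reverse.dropWhile PySem.Chars.isspace = [] := by
    have := congrArg List.reverse h
    simpa [PySem.Chars.rstrip] using this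
  simp only [List.all_eq_true]
  intro c hc
  exact (List.dropWhile_eq_nil_iff.mp hd) c (List.mem_reverse.mpr hc)

theorem step_eq (out : List String) (p : String)
    (hp : p.toList.all PySem.Chars.isspace = true) (part : String) :
    pvStepA (out, p) part = pvStepS (out, p) part ∧
      ((pvStepS (out, p) part).2).toList.all PySem.Chars.isspace = true := by
  by_cases hpart : part = ""
  · subst hpart
    have hB : pvStepS (out, p) "" = (out, p) := by
      simp [pvStepS, show PySem.Str.rstrip "" = "" from by decide]
    exact ⟨by rw [hB]; simp [pvStepA], by rw [hB]; exact hp⟩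
  · have htL : part.toList ≠ [] := by
      intro h
      exact hpart (String.toList_inj.mp (by simpa using h))
    have hkt : (PySem.Str.rstrip part).toList = PySem.Chars.rstrip part.toList :=
      PySem.Str.toList_rstrip part
    have hcomb : (p ++ part).toList = p.toList ++ part.toList := by simp
    have hscan : pvScanBack (p ++ part).toList (p ++ part).toList.length
        = ((PySem.Chars.rstrip (p.toList ++ part.toList)).length : Int) - 1 := by
      rw [hcomb, pvScanBack_eq_rstrip]
    have hra := rstrip_ws_append p.toList part.toList hp
    by_cases hk : PySem.Chars.rstrip part.toList = []
    · -- part is all whitespace: both sides just extend pending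
      have hBkept : PySem.Str.rstrip part = "" := String.toList_inj.mp (by rw [hkt, hk]; rfl)
      have hlast : pvScanBack (p ++ part).toList (p ++ part).toList.length = -1 := by
        rw [hscan, hra]; simp [hk]
      have hA : pvStepA (out, p) part = (out, p ++ part) := by
        simp only [pvStepA, if_neg hpart]
        rw [hlast]
        simp
      have hB : pvStepS (out, p) part = (out, p ++ part) := by
        simp [pvStepS, hBkept]
      refine ⟨by rw [hA, hB], ?_⟩
      rw [hB, hcomb]
      simp only [List.all_append, Bool.and_eq_true]
      exact ⟨hp, all_ws_of_rstrip_nil part.toList hk⟩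
    · -- part carries a non-whitespace character
      obtain ⟨hdec, hw⟩ := rstrip_prefix_decomp part.toList
      set w := (part.toList.reverse.takeWhile PySem.Chars.isspace).reverse with hwdef
      have hsplit : p.toList ++ part.toList
          = (p.toList ++ PySem.Chars.rstrip part.toList) ++ w := by
        rw [List.append_assoc, ← hdec]
      have hkpos : 1 ≤ (PySem.Chars.rstrip part.toList).length :=
        List.length_pos_of_ne_nil hk
      have hN : (PySem.Chars.rstrip (p.toList ++ part.toList)).length
          = p.toList.length + (PySem.Chars.rstrip part.toList).length := by
        rw [hra]; simp [hk]
      have hlast : pvScanBack (p ++ part).toList (p ++ part).toList.length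
          = ((p.toList.length + (PySem.Chars.rstrip part.toList).length : Nat) : Int) - 1 := by
        rw [hscan, hN]
      have hne : pvScanBack (p ++ part).toList (p ++ part).toList.length ≠ -1 := by
        rw [hlast]; omega
      have hp1 : pvScanBack (p ++ part).toList (p ++ part).toList.length + 1
          = ((p.toList.length + (PySem.Chars.rstrip part.toList).length : Nat) : Int) := by
        rw [hlast]; omega
      have hdrop : ∀ (m : Nat), (PySem.Chars.rstrip part.toList).length = m →
          List.drop m part.toList = w := by
        intro m hm
        rw [hdec]
        exact List.drop_left' hm
      have hA : pvStepA (out, p) part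
          = (out ++ [PySem.Str.slice (p ++ part) none
                (some ((p.toList.length + (PySem.Chars.rstrip part.toList).length : Nat) : Int))],
             PySem.Str.slice (p ++ part)
                (some ((p.toList.length + (PySem.Chars.rstrip part.toList).length : Nat) : Int)) none) := by
        simp only [pvStepA, hpart, if_false, hne, hp1]
      have hkne : PySem.Str.rstrip part ≠ "" := by
        intro h
        exact hk (by rw [← hkt, h]; rfl)
      have hlen : (PySem.Str.rstrip part).length = (PySem.Chars.rstrip part.toList).length := by
        rw [← String.length_toList, hkt]
      have hB : pvStepS (out, p) part
          = (out ++ [p ++ PySem.Str.rstrip part],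
             PySem.Str.slice part (some (((PySem.Str.rstrip part).length : Nat) : Int)) none) := by
        simp only [pvStepS, hkne, ne_eq, not_false_eq_true, if_true]
      have hfst : PySem.Str.slice (p ++ part) none
            (some ((p.toList.length + (PySem.Chars.rstrip part.toList).length : Nat) : Int))
          = p ++ PySem.Str.rstrip part := by
        apply String.toList_inj.mp
        rw [PySem.Str.toList_slice]
        simp only [PySem.Chars.slice_eq_listSlice, PySem.List.slice_to_natCast]
        rw [hcomb, hsplit, List.take_left' (by simp)]
        simp [hkt]
      have hsnd : PySem.Str.slice (p ++ part)
            (some ((p.toList.length + (PySem.Chars.rstrip part.toList).length : Nat) : Int)) none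
          = PySem.Str.slice part (some (((PySem.Str.rstrip part).length : Nat) : Int)) none := by
        apply String.toList_inj.mp
        rw [PySem.Str.toList_slice, PySem.Str.toList_slice]
        simp only [PySem.Chars.slice_eq_listSlice, PySem.List.slice_from_natCast]
        rw [hcomb, hsplit, List.drop_left' (by simp), hlen, hdrop _ rfl]
      have hsndws : (PySem.Str.slice part
            (some (((PySem.Str.rstrip part).length : Nat) : Int)) none).toList.all
            PySem.Chars.isspace = true := by
        rw [PySem.Str.toList_slice]
        simp only [PySem.Chars.slice_eq_listSlice, PySem.List.slice_from_natCast]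
        rw [hlen, hdrop _ rfl]
        exact hw
      refine ⟨?_, ?_⟩
      · rw [hA, hB, hfst, hsnd]
      · rw [hB]
        exact hsndws

-- A's fold equals the streaming recursion specGo
theorem foldl_A_specGo (parts : List String) (out : List String) (p : String)
    (hp : p.toList.all PySem.Chars.isspace = true) :
    (parts.foldl pvStepA (out, p)).1 = out ++ specGo p parts := by
  induction parts generalizing out p with
  | nil => simp [specGo]
  | cons part rest ih =>
    obtain ⟨h1, h2⟩ := step_eq out p hp part
    have hsurj : pvStepS (out, p) part = ((pvStepS (out, p) part).1, (pvStepS (out, p) part).2) := rfl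
    rw [List.foldl_cons, h1, hsurj, ih _ _ h2]
    by_cases hkne : PySem.Str.rstrip part ≠ ""
    · simp [pvStepS, specGo, hkne]
    · simp [pvStepS, specGo, hkne]

-- ---- B side ----

-- char-level recursion for B's first pass (cut offsets)
def cutsF : List String → Nat → List Nat
  | [], _ => []
  | part :: rest, pos =>
    let k := (PySem.Str.rstrip part).toList.length
    (if k ≠ 0 then [pos + k] else []) ++ cutsF rest (pos + part.toList.length)

-- char-level recursion for B's second pass (slices between consecutive cuts)
def emitF (s : String) : Nat → List Nat → List String
  | _, [] => []
  | prev, c :: cs => PySem.Str.slice s (some ((prev : Nat) : Int)) (some ((c : Nat) : Int)) :: emitF s c cs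

theorem str_len_eq (t : String) : PySem.Str.len t = ((t.toList.length : Nat) : Int) := by
  simp [PySem.Str.len]

-- "".join over a list of chunks is their concatenation
theorem join_nil_flatten (xss : List (List Char)) : PySem.Chars.join [] xss = xss.flatten := by
  induction xss with
  | nil => rfl
  | cons x r ih =>
    cases r with
    | nil => simp [PySem.Chars.join, List.intercalate]
    | cons y s =>
      simp only [PySem.Chars.join, List.intercalate, List.intersperse] at *
      simp_all

theorem foldl_cut (parts : List String) : ∀ (cs : List Int) (pos : Nat),
    (parts.foldl pvStepCut (cs, ((pos : Nat) : Int))).1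
      = cs ++ (cutsF parts pos).map (fun n => ((n : Nat) : Int)) := by
  induction parts with
  | nil => intro cs pos; simp [cutsF]
  | cons part rest ih =>
    intro cs pos
    rw [List.foldl_cons]
    by_cases hk : (PySem.Str.rstrip part).toList.length = 0
    · have hstep : pvStepCut (cs, ((pos : Nat) : Int)) part
          = (cs, (((pos + part.toList.length : Nat)) : Int)) := by
        simp only [pvStepCut, str_len_eq, hk]
        simp
      rw [hstep, ih]
      simp only [cutsF]
      rw [if_neg (not_not_intro hk)]
      simp
    · have hki : (((PySem.Str.rstrip part).toList.length : Nat) : Int) ≠ 0 := by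
        exact_mod_cast hk
      have hstep : pvStepCut (cs, ((pos : Nat) : Int)) part
          = (cs ++ [(((pos + (PySem.Str.rstrip part).toList.length : Nat)) : Int)],
             (((pos + part.toList.length : Nat)) : Int)) := by
        simp only [pvStepCut, str_len_eq]
        rw [if_pos hki]
        push_cast
        simp
      rw [hstep, ih]
      simp only [cutsF]
      rw [if_pos hk]
      simp

theorem foldl_emit (s : String) (cuts : List Nat) (out : List String) (prev : Nat) :
    ((cuts.map (fun n => ((n : Nat) : Int))).foldl (pvStepEmit s) (out, ((prev : Nat) : Int))).1
      = out ++ emitF s prev cuts := by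
  induction cuts generalizing out prev with
  | nil => simp [emitF]
  | cons c cs ih =>
    simp only [List.map_cons, List.foldl_cons, pvStepEmit]
    rw [ih]
    simp [emitF]

-- the main B lemma: emitting the slices between cuts is the streaming recursion
theorem emit_cuts_specGo (parts : List String) (s : String) :
    ∀ (p : String) (prev : Nat),
      p.toList.all PySem.Chars.isspace = true →
      s.toList.drop prev = p.toList ++ (parts.map String.toList).flatten →
      emitF s prev (cutsF parts (prev + p.toList.length)) = specGo p parts := by
  induction parts with
  | nil => intro p prev _ _; simp [cutsF, emitF, specGo]
  | cons part rest ih =>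
    intro p prev hp hdrop
    have hflat : ((part :: rest).map String.toList).flatten
        = part.toList ++ (rest.map String.toList).flatten := by simp
    rw [hflat] at hdrop
    have hkt : (PySem.Str.rstrip part).toList = PySem.Chars.rstrip part.toList :=
      PySem.Str.toList_rstrip part
    by_cases hkne : PySem.Str.rstrip part ≠ ""
    · -- part has a non-whitespace character
      obtain ⟨hdec, hw⟩ := rstrip_prefix_decomp part.toList
      set w := (part.toList.reverse.takeWhile PySem.Chars.isspace).reverse with hwdef
      set k := (PySem.Str.rstrip part).toList.length with hkdef
      have hk0 : k ≠ 0 := by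
        intro h
        exact hkne (String.toList_inj.mp (by
          simpa using List.length_eq_zero_iff.mp (hkdef.symm.trans h)))
      have hpartdec : part.toList = (PySem.Str.rstrip part).toList ++ w := by
        rw [hkt]; exact hdec
      have hcuts : cutsF (part :: rest) (prev + p.toList.length)
          = (prev + p.toList.length + k) :: cutsF rest (prev + p.toList.length + part.toList.length) := by
        simp only [cutsF]
        rw [if_pos (hkdef ▸ hk0)]
        rw [← hkdef]
        rfl
      rw [hcuts]
      simp only [emitF]
      have hklen : (PySem.Str.rstrip part).length = k := by
        rw [← String.length_toList]
      -- head slice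
      have hhead : PySem.Str.slice s (some ((prev : Nat) : Int))
            (some (((prev + p.toList.length + k : Nat)) : Int)) = p ++ PySem.Str.rstrip part := by
        apply String.toList_inj.mp
        rw [PySem.Str.toList_slice]
        simp only [PySem.Chars.slice_eq_listSlice, PySem.List.slice_natCast]
        have hsub : (prev + p.toList.length + k) - prev = p.toList.length + k := by omega
        rw [hsub, hdrop]
        have hre : p.toList ++ (part.toList ++ (rest.map String.toList).flatten)
            = (p.toList ++ (PySem.Str.rstrip part).toList) ++ (w ++ (rest.map String.toList).flatten) := by
          rw [hpartdec]; simp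
        rw [hre, List.take_left' (by simp [hkdef])]
        simp
      rw [hhead]
      -- tail via IH
      have hp' : (PySem.Str.slice part (some (((PySem.Str.rstrip part).length : Nat) : Int)) none).toList
          = w := by
        rw [PySem.Str.toList_slice]
        simp only [PySem.Chars.slice_eq_listSlice, PySem.List.slice_from_natCast]
        rw [hklen, hpartdec]
        exact List.drop_left' (by rw [hkdef])
      have hIH := ih (PySem.Str.slice part (some (((PySem.Str.rstrip part).length : Nat) : Int)) none)
          (prev + p.toList.length + k)
          (by rw [hp']; exact hw)
          (by
            rw [hp']
            have : prev + p.toList.length + k = prev + (p.toList.length + k) := by omega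
            rw [this, ← List.drop_drop, hdrop]
            have hre : p.toList ++ (part.toList ++ (rest.map String.toList).flatten)
                = (p.toList ++ (PySem.Str.rstrip part).toList) ++ (w ++ (rest.map String.toList).flatten) := by
              rw [hpartdec]; simp
            rw [hre, List.drop_left' (by simp [hkdef])])
      have hlenw : prev + p.toList.length + k
            + (PySem.Str.slice part (some (((PySem.Str.rstrip part).length : Nat) : Int)) none).toList.length
          = prev + p.toList.length + part.toList.length := by
        rw [hp']
        have : part.toList.length = k + w.length := by
          rw [hpartdec]; simp [hkdef]
        omega
      rw [hlenw] at hIH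
      rw [hIH]
      simp [specGo, hkne]
    · -- part is all whitespace
      rw [not_not] at hkne
      have hknil : (PySem.Str.rstrip part).toList = [] := by rw [hkne]; rfl
      have hk0 : (PySem.Str.rstrip part).toList.length = 0 := by rw [hknil]; rfl
      have hcuts : cutsF (part :: rest) (prev + p.toList.length)
          = cutsF rest (prev + p.toList.length + part.toList.length) := by
        simp only [cutsF]
        rw [if_neg (not_not_intro hk0)]
        simp
      have hppart : (p ++ part).toList = p.toList ++ part.toList := by simp
      have hIH := ih (p ++ part) prev
          (by
            rw [hppart]
            simp only [List.all_append, Bool.and_eq_true]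
            exact ⟨hp, all_ws_of_rstrip_nil part.toList (by rw [← hkt]; exact hknil)⟩)
          (by rw [hppart, hdrop, List.append_assoc])
      have hlen : prev + (p ++ part).toList.length = prev + p.toList.length + part.toList.length := by
        rw [hppart, List.length_append, Nat.add_assoc]
      rw [hlen] at hIH
      rw [hcuts, hIH]
      simp [specGo, hkne]

-- ===== VERDICT (by name: the statement is the Claim_ definition above) =====
theorem iter_trim_trailing_whitespace_spec : Claim_equal_iter_trim_trailing_whitespace := by
  intro parts _
  show _ = _
  unfold iter_trim_trailing_whitespace iter_trim_trailing_whitespace_alt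
  have hA : (parts.foldl pvStepA ([], "")).1 = specGo "" parts := by
    rw [foldl_A_specGo parts [] "" (by decide)]; simp
  have hjoin : (PySem.Str.join "" parts).toList = (parts.map String.toList).flatten := by
    rw [PySem.Str.toList_join]
    have h0 : ("" : String).toList = ([] : List Char) := rfl
    rw [h0, join_nil_flatten]
  have hcut : ((parts.foldl pvStepCut ([], 0)).1)
      = (cutsF parts 0).map (fun n => ((n : Nat) : Int)) := by
    have := foldl_cut parts [] 0
    simpa using this
  have hemit : (((cutsF parts 0).map (fun n => ((n : Nat) : Int))).foldl
        (pvStepEmit (PySem.Str.join "" parts)) ([], 0)).1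
      = emitF (PySem.Str.join "" parts) 0 (cutsF parts 0) := by
    have := foldl_emit (PySem.Str.join "" parts) (cutsF parts 0) [] 0
    simpa using this
  have hmain : emitF (PySem.Str.join "" parts) 0 (cutsF parts 0) = specGo "" parts := by
    have := emit_cuts_specGo parts (PySem.Str.join "" parts) "" 0 (by decide)
      (by simpa using hjoin)
    simpa using this
  rw [hA, hcut, hemit, hmain]
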